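-- pv_equiv track=rewrite | github.com/33k0/MCP-Fallback | harness/runner.py | _sanitize_tool_doc
-- ===== SOURCE A (Python) =====
-- def _sanitize_tool_doc(doc: str) -> str:
--     replacements = [
--         "GitHub", "GitLab", "Slack", "Discord",
--         "UberEats", "DoorDash", "Google Maps", "Mapbox",
--         "Brave", "Exa",
--     ]
--     clean = doc
--     for token in replacements:
--         clean = clean.replace(token, "service")
--     return " ".join(clean.split())
-- ===== SOURCE B (Python) =====
-- def _sanitize_tool_doc(doc: str) -> str:
--     # Single left-to-right scan replacing any brand token in one pass
--     # (instead of ten sequential .replace passes), then collapse whitespace.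
--     tokens = ("GitHub", "GitLab", "Slack", "Discord",
--               "UberEats", "DoorDash", "Google Maps", "Mapbox",
--               "Brave", "Exa")
--     out = []
--     i = 0
--     n = len(doc)
--     while i < n:
--         for t in tokens:
--             if doc.startswith(t, i):
--                 out.append("service")
--                 i += len(t)
--                 break
--         else:
--             out.append(doc[i])
--             i += 1
--     return " ".join("".join(out).split())
-- ===== Notes on version B (the rewrite author's own statement) =====
-- stated objective: alternative
-- what changed: B replaces the ten sequential str.replace passes by a single left-to-right scan trying the ten brand tokens at each position (first match wins), then collapses whitespace; Pre_ excludes inputs containing one of the ten cascade patterns (the stem of a later token directly followed by an earlier-listed token, e.g. 'UberEatGitHub'), where an earlier pass's inserted replacement completes a later token which the later pass then replaces again -- sequential and one-pass replacement legitimately disagree there and neither value is specified.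
-- outside the precondition, e.g. on _sanitize_tool_doc('UberEatGitHub'): A returns 'serviceervice', B returns 'UberEatservice'; on _sanitize_tool_doc('Google MapSlack'): A returns 'serviceervice', B returns 'Google Mapservice'
import Mathlib
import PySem

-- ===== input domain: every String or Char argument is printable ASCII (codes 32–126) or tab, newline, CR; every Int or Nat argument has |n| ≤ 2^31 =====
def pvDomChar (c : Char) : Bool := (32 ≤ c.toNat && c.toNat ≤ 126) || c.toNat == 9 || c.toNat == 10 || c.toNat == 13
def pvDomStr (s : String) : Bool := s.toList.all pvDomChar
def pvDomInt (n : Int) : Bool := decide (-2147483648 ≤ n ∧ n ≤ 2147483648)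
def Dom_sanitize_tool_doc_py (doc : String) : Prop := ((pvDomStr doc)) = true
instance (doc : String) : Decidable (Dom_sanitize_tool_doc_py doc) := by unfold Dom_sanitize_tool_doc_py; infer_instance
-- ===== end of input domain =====

-- B replaces A's ten sequential .replace passes by one left-to-right scan (first token match wins);
-- same cost class, genuinely different traversal. Whitespace collapse is identical in both.

-- ===== PORT A =====
def sanitize_tool_doc_py (doc : String) : String :=
  let clean :=
    (["GitHub", "GitLab", "Slack", "Discord",
      "UberEats", "DoorDash", "Google Maps", "Mapbox",
      "Brave", "Exa"] : List String).foldl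
      (fun s token => PySem.Str.replace s token "service") doc
  PySem.Str.join " " (PySem.Str.split₀ clean)

-- ===== PORT B =====
-- helpers of B: the replacement text and the token list, as char lists
def pvSvc : List Char := ['s', 'e', 'r', 'v', 'i', 'c', 'e']

def pvToks : List (List Char) :=
  ["GitHub".toList, "GitLab".toList, "Slack".toList, "Discord".toList,
   "UberEats".toList, "DoorDash".toList, "Google Maps".toList, "Mapbox".toList,
   "Brave".toList, "Exa".toList]

-- the single scan of Source B: at each position try the tokens in order; on a match emit
-- "service" and jump past the token, else copy the character
def pvScanF (ts : List (List Char)) : ℕ → List Char → List Char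
  | _, [] => []
  | 0, _ :: _ => []
  | fuel + 1, c :: cs =>
    match ts.find? (fun t => t.isPrefixOf (c :: cs)) with
    | some t => pvSvc ++ pvScanF ts fuel (cs.drop (t.length - 1))
    | none => c :: pvScanF ts fuel cs

def pvScan (ts : List (List Char)) (cs : List Char) : List Char := pvScanF ts cs.length cs

def sanitize_tool_doc_py_alt (doc : String) : String :=
  PySem.Str.join " " (PySem.Str.split₀ (String.ofList (pvScan pvToks doc.toList)))

-- ===== PRECONDITION & SPEC =====
-- the two stems whose completion by a replacement causes A's cascade
def pvUBE : List Char := "UberEat".toList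
def pvGM : List Char := "Google Map".toList

def pvBad : List (List Char) :=
  [pvUBE ++ "GitHub".toList, pvUBE ++ "GitLab".toList,
   pvUBE ++ "Slack".toList, pvUBE ++ "Discord".toList,
   pvGM ++ "GitHub".toList, pvGM ++ "GitLab".toList,
   pvGM ++ "Slack".toList, pvGM ++ "Discord".toList,
   pvGM ++ "UberEats".toList, pvGM ++ "DoorDash".toList]

-- pvBadHit cs = true iff one of the ten patterns of pvBad occurs as a contiguous
-- substring of cs (a single linear scan; see pvBadHit_iff below)
def pvBadHit : List Char → Bool
  | [] => false
  | c :: cs => if pvBad.any (fun p => p.isPrefixOf (c :: cs)) then true else pvBadHit cs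

-- Pre_ excludes inputs containing one of the ten cascade patterns of pvBad (the stem of a
-- later token directly followed by an earlier-listed token, e.g. 'UberEatGitHub'): there an
-- earlier pass's inserted replacement text supplies the letter completing a later token, which
-- that later pass then replaces again — a corner where sequential and one-pass replacement
-- legitimately disagree and no caller-visible spec picks either value.
def Pre_sanitize_tool_doc_py (doc : String) : Prop := pvBadHit doc.toList = false
instance (doc : String) : Decidable (Pre_sanitize_tool_doc_py doc) := by
  unfold Pre_sanitize_tool_doc_py; infer_instance

def pvWitness_sanitize_tool_doc_py : String := "Use GitHub or  Google Maps\tnow!"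

def Spec_sanitize_tool_doc_py (doc : String) (out : String) : Prop :=
  out = sanitize_tool_doc_py_alt doc
instance (doc : String) (out : String) : Decidable (Spec_sanitize_tool_doc_py doc out) := by
  unfold Spec_sanitize_tool_doc_py; infer_instance

-- ===== CLAIM (what is proved, stated in full; the proofs are below) =====
def Claim_equal_sanitize_tool_doc_py : Prop :=
  ∀ (doc : String), Dom_sanitize_tool_doc_py doc → Pre_sanitize_tool_doc_py doc →
    Spec_sanitize_tool_doc_py doc (sanitize_tool_doc_py doc)

-- ===== LEMMAS AND PROOFS =====

lemma pvIsPrefixOf_eq_false {a b : List Char} (h : ¬ a <+: b) : a.isPrefixOf b = false := by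
  cases hab : a.isPrefixOf b
  · rfl
  · exact absurd (List.isPrefixOf_iff_prefix.mp hab) h

lemma pvFind?_congr (p q : List Char → Bool) :
    ∀ (l : List (List Char)), (∀ x ∈ l, p x = q x) → l.find? p = l.find? q := by
  intro l
  induction l with
  | nil => intro _; rfl
  | cons a l ih =>
    intro h
    rw [List.find?_cons, List.find?_cons, h a (List.mem_cons_self ..)]
    cases q a
    · exact ih fun x hx => h x (List.mem_cons_of_mem _ hx)
    · rfl

lemma pvBadHit_iff : ∀ cs : List Char, pvBadHit cs = true ↔ ∃ p ∈ pvBad, p <:+: cs := by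
  intro cs
  induction cs with
  | nil =>
    constructor
    · intro h; simp [pvBadHit] at h
    · rintro ⟨p, hp, s, t, hst⟩
      obtain ⟨h1, h2⟩ := List.append_eq_nil_iff.mp hst
      obtain ⟨h3, h4⟩ := List.append_eq_nil_iff.mp h1
      subst h4
      revert hp
      decide
  | cons c cs ih =>
    rw [show pvBadHit (c :: cs)
        = (pvBad.any (fun p => p.isPrefixOf (c :: cs)) || pvBadHit cs) from by
      rw [pvBadHit]; cases pvBad.any (fun p => p.isPrefixOf (c :: cs)) <;> simp]
    constructor
    · intro h
      rw [Bool.or_eq_true] at h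
      rcases h with h1 | h2
      · obtain ⟨p, hp, hpre⟩ := List.any_eq_true.mp h1
        exact ⟨p, hp, (List.isPrefixOf_iff_prefix.mp hpre).isInfix⟩
      · obtain ⟨p, hp, hinf⟩ := ih.mp h2
        exact ⟨p, hp, hinf.trans (List.suffix_cons c cs).isInfix⟩
    · rintro ⟨p, hp, hinf⟩
      obtain ⟨w, hpw, hws⟩ := List.infix_iff_prefix_suffix.mp hinf
      rw [Bool.or_eq_true]
      rcases List.suffix_cons_iff.mp hws with rfl | hw
      · exact Or.inl (List.any_eq_true.mpr ⟨p, hp, List.isPrefixOf_iff_prefix.mpr hpw⟩)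
      · exact Or.inr (ih.mpr ⟨p, hp, List.infix_iff_prefix_suffix.mpr ⟨w, hpw, hw⟩⟩)

-- the fuel argument of pvScanF is irrelevant as long as it dominates the length
lemma pvScanF_eq (ts : List (List Char)) :
    ∀ (fuel n : ℕ) (cs : List Char), cs.length ≤ fuel → cs.length ≤ n →
      pvScanF ts fuel cs = pvScanF ts n cs := by
  intro fuel
  induction fuel with
  | zero =>
    intro n cs hf _
    have : cs = [] := List.eq_nil_of_length_eq_zero (Nat.le_zero.mp hf)
    subst this
    cases n <;> rfl
  | succ fuel ih =>
    intro n cs hf hn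
    cases cs with
    | nil => cases n <;> rfl
    | cons c cs' =>
      cases n with
      | zero => simp at hn
      | succ m =>
        show (match ts.find? (fun t => t.isPrefixOf (c :: cs')) with
            | some t => pvSvc ++ pvScanF ts fuel (cs'.drop (t.length - 1))
            | none => c :: pvScanF ts fuel cs')
          = (match ts.find? (fun t => t.isPrefixOf (c :: cs')) with
            | some t => pvSvc ++ pvScanF ts m (cs'.drop (t.length - 1))
            | none => c :: pvScanF ts m cs')
        simp only [List.length_cons] at hf hn
        cases ts.find? (fun t => t.isPrefixOf (c :: cs')) with
        | some t =>
          have h1 : (cs'.drop (t.length - 1)).length ≤ fuel := by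
            simp only [List.length_drop]; omega
          have h2 : (cs'.drop (t.length - 1)).length ≤ m := by
            simp only [List.length_drop]; omega
          simpa using congrArg (pvSvc ++ ·) (ih m _ h1 h2)
        | none =>
          simpa using congrArg (c :: ·) (ih m cs' (by omega) (by omega))

-- unfolding lemmas for pvScan
lemma pvScan_nil (ts : List (List Char)) : pvScan ts [] = [] := rfl

lemma pvScan_cons_none (ts : List (List Char)) (c : Char) (cs : List Char)
    (h : ts.find? (fun t => t.isPrefixOf (c :: cs)) = none) :
    pvScan ts (c :: cs) = c :: pvScan ts cs := by
  unfold pvScan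
  rw [show (c :: cs).length = cs.length + 1 from rfl, pvScanF, h]

lemma pvScan_cons_some (ts : List (List Char)) (c : Char) (cs : List Char) (t : List Char)
    (h : ts.find? (fun t => t.isPrefixOf (c :: cs)) = some t) (ht : t ≠ []) :
    pvScan ts (c :: cs) = pvSvc ++ pvScan ts ((c :: cs).drop t.length) := by
  unfold pvScan
  rw [show (c :: cs).length = cs.length + 1 from rfl, pvScanF, h]
  cases t with
  | nil => exact absurd rfl ht
  | cons a t' =>
    show pvSvc ++ pvScanF ts cs.length (cs.drop t'.length)
      = pvSvc ++ pvScanF ts (cs.drop t'.length).length (cs.drop t'.length)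
    exact congrArg (pvSvc ++ ·) (pvScanF_eq ts cs.length _ _
      (by simp only [List.length_drop]; omega) le_rfl)

-- no-hit condition: no token of ts is comparable with any nonempty suffix of u
abbrev pvNoHit (ts : List (List Char)) (u : List Char) : Prop :=
  ∀ k, k < u.length → ∀ t ∈ ts, ¬ t <+: u.drop k ∧ ¬ u.drop k <+: t

lemma pvNoHit_suffix {ts : List (List Char)} {u s t : List Char} (h : pvNoHit ts u)
    (hs : s <:+ u) (hne : s ≠ []) (htm : t ∈ ts) : ¬ t <+: s ∧ ¬ s <+: t := by
  have heq : s = u.drop (u.length - s.length) := List.suffix_iff_eq_drop.mp hs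
  have hlen : s.length ≤ u.length := hs.length_le
  have hpos : 0 < s.length := List.length_pos_of_ne_nil hne
  have hk : u.length - s.length < u.length := by omega
  rw [heq]; exact h _ hk t htm

lemma pvNoHit_tail {ts : List (List Char)} {c : Char} {u : List Char}
    (h : pvNoHit ts (c :: u)) : pvNoHit ts u := by
  intro k hk t htm
  have := h (k + 1) (by simpa using Nat.succ_lt_succ hk) t htm
  simpa using this

-- skip lemma: a scan passes verbatim over a block no token can touch
lemma pvScan_append (ts : List (List Char)) :
    ∀ (u : List Char), pvNoHit ts u → ∀ x, pvScan ts (u ++ x) = u ++ pvScan ts x := by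
  intro u
  induction u with
  | nil => intro _ x; simp
  | cons c u' ih =>
    intro h x
    have hnone : (List.find? (fun t => t.isPrefixOf (c :: (u' ++ x))) ts) = none := by
      apply List.find?_eq_none.mpr
      intro t htm hb
      have hpre : t <+: (c :: u') ++ x := List.isPrefixOf_iff_prefix.mp hb
      rcases List.prefix_or_prefix_of_prefix hpre (List.prefix_append (c :: u') x) with h1 | h2
      · exact (pvNoHit_suffix h (List.suffix_refl _) (List.cons_ne_nil _ _) htm).1 h1
      · exact (pvNoHit_suffix h (List.suffix_refl _) (List.cons_ne_nil _ _) htm).2 h2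
    show pvScan ts (c :: (u' ++ x)) = (c :: u') ++ pvScan ts x
    rw [pvScan_cons_none _ _ _ hnone, ih (pvNoHit_tail h) x]
    rfl

-- prefix characterization: what can be a prefix of a single-token scan output
lemma pvScan_prefix_char (t : List Char) (ht : t ≠ []) :
    ∀ (y p : List Char), ¬ pvSvc <:+: p → p <+: pvScan [t] y →
      p <+: y ∨ ∃ α β, p = α ++ β ∧ β ≠ [] ∧ β <+: pvSvc ∧ (α ++ t) <+: y := by
  intro y
  induction y with
  | nil =>
    intro p _ hp
    rw [pvScan_nil] at hp
    exact Or.inl hp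
  | cons c y' ih =>
    intro p hs hp
    by_cases hm : t.isPrefixOf (c :: y') = true
    · have hfind : List.find? (fun t' => t'.isPrefixOf (c :: y')) [t] = some t := by
        simp [List.find?, hm]
      rw [pvScan_cons_some _ _ _ _ hfind ht] at hp
      rcases List.prefix_or_prefix_of_prefix hp (List.prefix_append pvSvc _) with h1 | h2
      · rcases eq_or_ne p [] with rfl | hne
        · exact Or.inl List.nil_prefix
        · exact Or.inr ⟨[], p, by simp, hne, h1, by
            simpa using List.isPrefixOf_iff_prefix.mp hm⟩
      · exact absurd h2.isInfix hs
    · have hfind : List.find? (fun t' => t'.isPrefixOf (c :: y')) [t] = none := by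
        simp [List.find?, hm]
      rw [pvScan_cons_none _ _ _ hfind] at hp
      cases p with
      | nil => exact Or.inl List.nil_prefix
      | cons p0 p' =>
        rw [List.cons_prefix_cons] at hp
        obtain ⟨rfl, hp'⟩ := hp
        have hs' : ¬ pvSvc <:+: p' := fun hh => hs (hh.trans (List.suffix_cons p0 p').isInfix)
        rcases ih p' hs' hp' with h1 | ⟨α, β, rfl, hβ, hβs, hαt⟩
        · exact Or.inl (List.cons_prefix_cons.mpr ⟨rfl, h1⟩)
        · exact Or.inr ⟨p0 :: α, β, rfl, hβ, hβs,
            List.cons_prefix_cons.mpr ⟨rfl, hαt⟩⟩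

lemma pvSuffix_append_cases (a : List Char) :
    ∀ (b w : List Char), w <:+ a ++ b → w <:+ b ∨ ∃ σ, σ <:+ a ∧ w = σ ++ b := by
  induction a with
  | nil => intro b w h; exact Or.inl (by simpa using h)
  | cons c a' ih =>
    intro b w h
    rw [List.cons_append, List.suffix_cons_iff] at h
    rcases h with rfl | h
    · exact Or.inr ⟨c :: a', List.suffix_refl _, rfl⟩
    · rcases ih b w h with h1 | ⟨σ, hσ, rfl⟩
      · exact Or.inl h1
      · exact Or.inr ⟨σ, hσ.trans (List.suffix_cons c a'), rfl⟩

-- suffix structure of a single-token scan output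
lemma pvScan_suffix_char (t : List Char) (ht : t ≠ []) :
    ∀ (n : ℕ) (y w : List Char), y.length ≤ n → w <:+ pvScan [t] y →
      ∃ σ y', σ <:+ pvSvc ∧ y' <:+ y ∧ w = σ ++ pvScan [t] y' := by
  intro n
  induction n with
  | zero =>
    intro y w hlen hw
    have hy : y = [] := List.eq_nil_of_length_eq_zero (Nat.le_zero.mp hlen)
    subst hy
    rw [pvScan_nil] at hw
    refine ⟨[], [], List.nil_suffix, List.suffix_refl _, ?_⟩
    rw [List.suffix_nil.mp hw]; simp [pvScan_nil]
  | succ n ihn =>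
    intro y w hlen hw
    cases y with
    | nil =>
      rw [pvScan_nil] at hw
      refine ⟨[], [], List.nil_suffix, List.suffix_refl _, ?_⟩
      rw [List.suffix_nil.mp hw]; simp [pvScan_nil]
    | cons c y' =>
      have htpos : 0 < t.length := List.length_pos_of_ne_nil ht
      by_cases hm : t.isPrefixOf (c :: y') = true
      · have hfind : List.find? (fun t' => t'.isPrefixOf (c :: y')) [t] = some t := by
          simp [List.find?, hm]
        rw [pvScan_cons_some _ _ _ _ hfind ht] at hw
        rcases pvSuffix_append_cases pvSvc _ w hw with h1 | ⟨σ, hσ, rfl⟩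
        · have hdl : ((c :: y').drop t.length).length ≤ n := by
            simp only [List.length_drop, List.length_cons] at *
            omega
          rcases ihn _ w hdl h1 with ⟨σ, y'', hσ, hy'', rfl⟩
          exact ⟨σ, y'', hσ, hy''.trans (List.drop_suffix _ _), rfl⟩
        · exact ⟨σ, (c :: y').drop t.length, hσ, List.drop_suffix _ _, rfl⟩
      · have hfind : List.find? (fun t' => t'.isPrefixOf (c :: y')) [t] = none := by
          simp [List.find?, hm]
        rw [pvScan_cons_none _ _ _ hfind] at hw
        rcases List.suffix_cons_iff.mp hw with rfl | h1
        · refine ⟨[], c :: y', List.nil_suffix, List.suffix_refl _, ?_⟩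
          rw [pvScan_cons_none _ _ _ hfind]; rfl
        · rcases ihn y' w (by simpa using Nat.le_of_succ_le_succ hlen) h1 with
            ⟨σ, y'', hσ, hy'', rfl⟩
          exact ⟨σ, y'', hσ, hy''.trans (List.suffix_cons c y'), rfl⟩

-- infix characterization: an occurrence in the scanned output is either an occurrence in the
-- input or ends inside an inserted 'service' block right after a replaced token occurrence
lemma pvScan_infix_char (t : List Char) (ht : t ≠ []) (q : List Char)
    (h0 : pvSvc.length < q.length) (h1 : ¬ pvSvc <:+: q)
    (h2 : ∀ k, k < pvSvc.length → ¬ (pvSvc.drop k <+: q)) :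
    ∀ y, q <:+: pvScan [t] y →
      q <:+: y ∨ ∃ α β, q = α ++ β ∧ β ≠ [] ∧ β <+: pvSvc ∧ (α ++ t) <:+: y := by
  intro y hq
  obtain ⟨w, hqw, hws⟩ := List.infix_iff_prefix_suffix.mp hq
  obtain ⟨σ, y', hσ, hy', rfl⟩ := pvScan_suffix_char t ht y.length y w le_rfl hws
  rcases List.prefix_or_prefix_of_prefix hqw (List.prefix_append σ _) with hqσ | hσq
  · exfalso
    have := hqσ.length_le
    have := hσ.length_le
    omega
  · rcases eq_or_ne σ [] with rfl | hσne
    · have hq' : q <+: pvScan [t] y' := by simpa using hqw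
      rcases pvScan_prefix_char t ht y' q h1 hq' with h | ⟨α, β, rfl, hβ, hβs, hαt⟩
      · exact Or.inl (List.infix_iff_prefix_suffix.mpr ⟨y', h, hy'⟩)
      · exact Or.inr ⟨α, β, rfl, hβ, hβs, List.infix_iff_prefix_suffix.mpr ⟨y', hαt, hy'⟩⟩
    · exfalso
      have heq : σ = pvSvc.drop (pvSvc.length - σ.length) := List.suffix_iff_eq_drop.mp hσ
      have hσlen : σ.length ≤ pvSvc.length := hσ.length_le
      have hσpos : 0 < σ.length := List.length_pos_of_ne_nil hσne
      exact h2 (pvSvc.length - σ.length) (by omega) (heq ▸ hσq)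

-- pushing a not-an-occurrence fact through one replace pass
lemma pvPush (t : List Char) (ht : t ≠ []) (q : List Char)
    (h0 : pvSvc.length < q.length) (h1 : ¬ pvSvc <:+: q)
    (h2 : ∀ k, k < pvSvc.length → ¬ (pvSvc.drop k <+: q))
    (y : List Char) (hq : ¬ q <:+: y)
    (hd : ∀ α β, q = α ++ β → β ≠ [] → β <+: pvSvc → ¬ ((α ++ t) <:+: y)) :
    ¬ q <:+: pvScan [t] y := by
  intro h
  rcases pvScan_infix_char t ht q h0 h1 h2 y h with h' | ⟨α, β, hqe, hβ, hβs, hi⟩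
  · exact hq h'
  · exact hd α β hqe hβ hβs hi

-- bundled decidable side conditions for patterns that no replacement can create
abbrev pvPushOk (t q : List Char) : Prop :=
  t ≠ [] ∧ pvSvc.length < q.length ∧ ¬ pvSvc <:+: q ∧
  (∀ k, k < pvSvc.length → ¬ (pvSvc.drop k <+: q)) ∧
  (∀ k, k < q.length → ¬ (q.drop k <+: pvSvc))

lemma pvPushSimple (t q : List Char) (hok : pvPushOk t q) (y : List Char)
    (hq : ¬ q <:+: y) : ¬ q <:+: pvScan [t] y := by
  obtain ⟨ht, h0, h1, h2, h3⟩ := hok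
  refine pvPush t ht q h0 h1 h2 y hq ?_
  intro α β hqe hβ hβs _
  exfalso
  have hβeq : β = q.drop α.length := by rw [hqe, List.drop_left]
  have hlt : α.length < q.length := by
    by_contra hh
    push_neg at hh
    exact hβ (hβeq.trans (List.drop_eq_nil_iff.mpr hh))
  exact h3 α.length hlt (hβeq ▸ hβs)

-- the one pattern a pass can create: 'Google MapUberEats' out of 'Google MapUberEat'+token
lemma pvPushGMS (t : List Char) (ht : t ≠ []) (y : List Char)
    (hq : ¬ (pvGM ++ "UberEats".toList) <:+: y)
    (hu : ¬ (pvUBE ++ t) <:+: y) : ¬ (pvGM ++ "UberEats".toList) <:+: pvScan [t] y := by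
  refine pvPush t ht _ (by decide) (by decide) (by decide) y hq ?_
  intro α β hqe hβ hβs hinf
  have hβeq : β = (pvGM ++ "UberEats".toList).drop α.length := by rw [hqe, List.drop_left]
  have hαeq : α = (pvGM ++ "UberEats".toList).take α.length := by rw [hqe, List.take_left]
  have hlt : α.length < (pvGM ++ "UberEats".toList).length := by
    by_contra hh
    push_neg at hh
    exact hβ (hβeq.trans (List.drop_eq_nil_iff.mpr hh))
  have hfact : ∀ k, k < (pvGM ++ "UberEats".toList).length →
      ((pvGM ++ "UberEats".toList).drop k) <+: pvSvc → k = 17 := by decide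
  have hk : α.length = 17 := hfact _ hlt (hβeq ▸ hβs)
  have hα : α = pvGM ++ pvUBE := by rw [hαeq, hk]; decide
  apply hu
  have h1 : α ++ t = pvGM ++ (pvUBE ++ t) := by rw [hα, List.append_assoc]
  rw [h1] at hinf
  exact List.IsInfix.trans (⟨pvGM, [], by simp⟩ : (pvUBE ++ t) <:+: pvGM ++ (pvUBE ++ t)) hinf

-- cascade-freedom of one outer token t'' with respect to the inner token t on input y
def pvCF1 (t t'' y : List Char) : Prop :=
  ∀ α β, t'' = α ++ β → α ≠ [] → β ≠ [] → β <+: pvSvc → ¬ ((α ++ t) <:+: y)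

lemma pvCF1_noS (t t'' y : List Char)
    (hns : ∀ k, k < t''.length → ¬ (t''.drop k <+: pvSvc)) : pvCF1 t t'' y := by
  intro α β hqe _ hβ hβs _
  have hβeq : β = t''.drop α.length := by rw [hqe, List.drop_left]
  have hlt : α.length < t''.length := by
    by_contra hh
    push_neg at hh
    exact hβ (hβeq.trans (List.drop_eq_nil_iff.mpr hh))
  exact hns α.length hlt (hβeq ▸ hβs)

lemma pvCF1_sTok (t t'' y w : List Char)
    (hss : ∀ k, k < t''.length → (t''.drop k <+: pvSvc) → k = t''.length - 1)
    (hw : t''.take (t''.length - 1) = w)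
    (hfact : ¬ ((w ++ t) <:+: y)) : pvCF1 t t'' y := by
  intro α β hqe _ hβ hβs hinf
  have hβeq : β = t''.drop α.length := by rw [hqe, List.drop_left]
  have hαeq : α = t''.take α.length := by rw [hqe, List.take_left]
  have hlt : α.length < t''.length := by
    by_contra hh
    push_neg at hh
    exact hβ (hβeq.trans (List.drop_eq_nil_iff.mpr hh))
  have hk : α.length = t''.length - 1 := hss _ hlt (hβeq ▸ hβs)
  have hα : α = w := by rw [hαeq, hk, hw]
  exact hfact (hα ▸ hinf)

-- THE FUSION LEMMA: scanning with ts after a single pass with t equals one scan with t :: ts,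
-- provided no cascade pattern for (t, ts) occurs in the input
lemma pvFusion (t : List Char) (ts : List (List Char))
    (ht : t ≠ []) (hts : ∀ t' ∈ ts, t' ≠ [])
    (hsvc : pvNoHit ts pvSvc)
    (hskip : ∀ t' ∈ ts, pvNoHit [t] t')
    (hcmp : ∀ a ∈ t :: ts, ∀ b ∈ t :: ts, a ≠ b → ¬ a <+: b)
    (htl : ∀ t'' ∈ ts, ¬ pvSvc <:+: t''.tail) :
    ∀ (n : ℕ) (y : List Char), y.length ≤ n → (∀ t'' ∈ ts, pvCF1 t t'' y) →
      pvScan ts (pvScan [t] y) = pvScan (t :: ts) y := by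
  intro n
  induction n with
  | zero =>
    intro y hlen _
    have hy : y = [] := List.eq_nil_of_length_eq_zero (Nat.le_zero.mp hlen)
    subst hy
    simp [pvScan_nil]
  | succ n ihn =>
    intro y hlen hcf
    cases y with
    | nil => simp [pvScan_nil]
    | cons c y' =>
      have htpos : 0 < t.length := List.length_pos_of_ne_nil ht
      by_cases hmt : t.isPrefixOf (c :: y') = true
      · -- t matches at position 0
        have hfind1 : List.find? (fun t' => t'.isPrefixOf (c :: y')) [t] = some t := by
          simp [List.find?, hmt]
        have hfindR : List.find? (fun t' => t'.isPrefixOf (c :: y')) (t :: ts) = some t := by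
          simp [hmt]
        have hcf' : ∀ t'' ∈ ts, pvCF1 t t'' ((c :: y').drop t.length) := by
          intro t'' hm α β hqe hα hβ hβs hinf
          exact hcf t'' hm α β hqe hα hβ hβs (hinf.trans (List.drop_suffix _ _).isInfix)
        have hlen' : ((c :: y').drop t.length).length ≤ n := by
          simp only [List.length_drop, List.length_cons] at *
          omega
        rw [pvScan_cons_some _ _ _ _ hfind1 ht,
            pvScan_append ts pvSvc hsvc _,
            ihn _ hlen' hcf',
            pvScan_cons_some _ _ _ _ hfindR ht]
      · have hfearly : List.find? (fun t' => t'.isPrefixOf (c :: y')) (t :: ts)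
            = List.find? (fun t' => t'.isPrefixOf (c :: y')) ts := by
          have hmf : t.isPrefixOf (c :: y') = false :=
            pvIsPrefixOf_eq_false (fun hh => hmt (List.isPrefixOf_iff_prefix.mpr hh))
          simp [hmf]
        have hfind1 : List.find? (fun t' => t'.isPrefixOf (c :: y')) [t] = none := by
          simp [List.find?, hmt]
        have hinner : pvScan [t] (c :: y') = c :: pvScan [t] y' :=
          pvScan_cons_none _ _ _ hfind1
        cases hfind : List.find? (fun t' => t'.isPrefixOf (c :: y')) ts with
        | some t₁ =>
          have ht₁mem : t₁ ∈ ts := List.mem_of_find?_eq_some hfind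
          have hb1 : t₁.isPrefixOf (c :: y') = true :=
            List.find?_some (p := fun t' : List Char => t'.isPrefixOf (c :: y')) hfind
          have ht₁pre : t₁ <+: c :: y' := List.isPrefixOf_iff_prefix.mp hb1
          have ht₁ne : t₁ ≠ [] := hts _ ht₁mem
          have ht₁pos : 0 < t₁.length := List.length_pos_of_ne_nil ht₁ne
          obtain ⟨rest, hysplit⟩ := ht₁pre
          -- the single t-pass copies the t₁ block verbatim
          have hskip1 : pvScan [t] (t₁ ++ rest) = t₁ ++ pvScan [t] rest :=
            pvScan_append [t] t₁ (hskip t₁ ht₁mem) rest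
          -- on t₁ ++ anything, each token of ts matches at 0 iff it does on y
          have hpt : ∀ (X : List Char), ∀ t'' ∈ ts,
              (t''.isPrefixOf (t₁ ++ X)) = (t''.isPrefixOf (c :: y')) := by
            intro X t'' hm
            rcases eq_or_ne t'' t₁ with rfl | hne
            · rw [List.isPrefixOf_iff_prefix.mpr (List.prefix_append _ _),
                  List.isPrefixOf_iff_prefix.mpr (⟨rest, hysplit⟩ : t'' <+: c :: y')]
            · have hnot : ∀ Z : List Char, ¬ t'' <+: t₁ ++ Z := by
                intro Z hh
                rcases List.prefix_or_prefix_of_prefix hh (List.prefix_append t₁ Z) with h1 | h2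
                · exact hcmp t'' (List.mem_cons_of_mem _ hm) t₁
                    (List.mem_cons_of_mem _ ht₁mem) hne h1
                · exact hcmp t₁ (List.mem_cons_of_mem _ ht₁mem) t''
                    (List.mem_cons_of_mem _ hm) (Ne.symm hne) h2
              rw [pvIsPrefixOf_eq_false (hnot X), ← hysplit,
                  pvIsPrefixOf_eq_false (hnot rest)]
          have hfind2 : List.find? (fun t' => t'.isPrefixOf (t₁ ++ pvScan [t] rest)) ts
              = some t₁ := by
            rw [pvFind?_congr _ _ ts (fun t'' hm => hpt (pvScan [t] rest) t'' hm), hfind]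
          -- unfold outer scan at the match
          have ht₁X : t₁ ++ pvScan [t] rest ≠ [] := by
            cases t₁ with
            | nil => exact absurd rfl ht₁ne
            | cons a u => simp
          have houter : pvScan ts (t₁ ++ pvScan [t] rest)
              = pvSvc ++ pvScan ts ((t₁ ++ pvScan [t] rest).drop t₁.length) := by
            cases hsplit2 : t₁ ++ pvScan [t] rest with
            | nil => exact absurd hsplit2 ht₁X
            | cons d ds =>
              rw [← hsplit2, hsplit2, pvScan_cons_some _ _ _ _ (hsplit2 ▸ hfind2) ht₁ne,
                  ← hsplit2]
          have hrest_len : rest.length ≤ n := by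
            have h1 := congrArg List.length hysplit
            have h2 := hlen
            simp only [List.length_cons, List.length_append] at h1 h2
            omega
          have hrest_suffix : rest <:+ c :: y' := by
            rw [← hysplit]
            exact ⟨t₁, rfl⟩
          have hcf' : ∀ t'' ∈ ts, pvCF1 t t'' rest := by
            intro t'' hm α β hqe hα hβ hβs hinf
            exact hcf t'' hm α β hqe hα hβ hβs (hinf.trans hrest_suffix.isInfix)
          have hdropR : (c :: y').drop t₁.length = rest := by
            rw [← hysplit, List.drop_left]
          rw [← hysplit, hskip1, houter, List.drop_left,
              ihn rest hrest_len hcf']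
          -- RHS
          rw [show pvScan (t :: ts) (t₁ ++ rest) = pvScan (t :: ts) (c :: y') by rw [hysplit]]
          rw [pvScan_cons_some (t :: ts) c y' t₁ (by rw [hfearly]; exact hfind) ht₁ne, hdropR]
        | none =>
          have houtnone : List.find? (fun t' => t'.isPrefixOf (c :: pvScan [t] y')) ts
              = none := by
            apply List.find?_eq_none.mpr
            intro t'' hm hb
            have hpre : t'' <+: c :: pvScan [t] y' := List.isPrefixOf_iff_prefix.mp hb
            cases t'' with
            | nil => exact (hts [] hm) rfl
            | cons d tcs =>
              rw [List.cons_prefix_cons] at hpre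
              obtain ⟨rfl, htcs⟩ := hpre
              have hsq : ¬ pvSvc <:+: tcs := by simpa using htl _ hm
              rcases pvScan_prefix_char t ht y' tcs hsq htcs with h1 | ⟨α, β, hqe, hβ, hβs, hαt⟩
              · exact (List.find?_eq_none.mp hfind _ hm)
                  (List.isPrefixOf_iff_prefix.mpr (List.cons_prefix_cons.mpr ⟨rfl, h1⟩))
              · refine hcf (d :: tcs) hm (d :: α) β ?_ (List.cons_ne_nil _ _) hβ hβs ?_
                · rw [hqe]; rfl
                · exact (List.cons_prefix_cons.mpr ⟨rfl, hαt⟩).isInfix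
          have hcf' : ∀ t'' ∈ ts, pvCF1 t t'' y' := by
            intro t'' hm α β hqe hα hβ hβs hinf
            exact hcf t'' hm α β hqe hα hβ hβs (hinf.trans (List.suffix_cons c y').isInfix)
          rw [hinner, pvScan_cons_none _ _ _ houtnone,
              ihn y' (by simpa using Nat.le_of_succ_le_succ hlen) hcf',
              pvScan_cons_none (t :: ts) c y' (by rw [hfearly]; exact hfind)]

-- bridge from PySem's replace (fuelled scan with accumulator) to pvScan with a single token
lemma pvReplaceGo (old : List Char) (hold : old ≠ []) :
    ∀ (fuel : ℕ) (l acc : List Char), l.length ≤ fuel →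
      PySem.Chars.replace.go old pvSvc fuel l acc = acc.reverse ++ pvScan [old] l := by
  intro fuel
  induction fuel with
  | zero =>
    intro l acc hlen
    have hl : l = [] := List.eq_nil_of_length_eq_zero (Nat.le_zero.mp hlen)
    subst hl
    simp [PySem.Chars.replace.go, pvScan_nil]
  | succ fuel ih =>
    intro l acc hlen
    cases l with
    | nil => simp [PySem.Chars.replace.go, pvScan_nil]
    | cons c tl =>
      have holdpos : 0 < old.length := List.length_pos_of_ne_nil hold
      by_cases hm : old.isPrefixOf (c :: tl) = true
      · have hfind : List.find? (fun t' => t'.isPrefixOf (c :: tl)) [old] = some old := by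
          simp [List.find?, hm]
        have hdl : ((c :: tl).drop old.length).length ≤ fuel := by
          simp only [List.length_drop, List.length_cons] at *
          omega
        rw [show PySem.Chars.replace.go old pvSvc (fuel + 1) (c :: tl) acc
            = if old.isPrefixOf (c :: tl) = true then
                PySem.Chars.replace.go old pvSvc fuel ((c :: tl).drop old.length)
                  (pvSvc.reverse ++ acc)
              else PySem.Chars.replace.go old pvSvc fuel tl (c :: acc) from rfl]
        rw [if_pos hm, ih _ _ hdl, pvScan_cons_some _ _ _ _ hfind hold]
        simp
      · have hfind : List.find? (fun t' => t'.isPrefixOf (c :: tl)) [old] = none := by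
          simp [List.find?, hm]
        rw [show PySem.Chars.replace.go old pvSvc (fuel + 1) (c :: tl) acc
            = if old.isPrefixOf (c :: tl) = true then
                PySem.Chars.replace.go old pvSvc fuel ((c :: tl).drop old.length)
                  (pvSvc.reverse ++ acc)
              else PySem.Chars.replace.go old pvSvc fuel tl (c :: acc) from rfl]
        rw [if_neg (by simp [hm]), ih tl (c :: acc) (by simpa using Nat.le_of_succ_le_succ hlen),
            pvScan_cons_none _ _ _ hfind]
        simp

lemma pvReplace_eq_scan (old : List Char) (hold : old ≠ []) (s : List Char) :
    PySem.Chars.replace s old pvSvc = pvScan [old] s := by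
  rw [PySem.Chars.replace]
  rw [if_neg (by cases old with | nil => exact absurd rfl hold | cons a u => simp)]
  rw [pvReplaceGo old hold s.length s [] le_rfl]
  simp

-- the chain: ten sequential single-token passes equal one scan with all ten tokens,
-- for inputs free of the ten cascade patterns
lemma pvChain (cs : List Char) (hNB : ∀ p ∈ pvBad, ¬ p <:+: cs) :
    pvScan ["Exa".toList] (pvScan ["Brave".toList] (pvScan ["Mapbox".toList]
      (pvScan ["Google Maps".toList] (pvScan ["DoorDash".toList]
      (pvScan ["UberEats".toList] (pvScan ["Discord".toList] (pvScan ["Slack".toList]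
      (pvScan ["GitLab".toList] (pvScan ["GitHub".toList] cs)))))))))
    = pvScan pvToks cs := by
  -- the ten pattern facts at level 0
  have nU0 : ¬ (pvUBE ++ "GitHub".toList) <:+: cs := hNB _ (by simp [pvBad])
  have nU1 : ¬ (pvUBE ++ "GitLab".toList) <:+: cs := hNB _ (by simp [pvBad])
  have nU2 : ¬ (pvUBE ++ "Slack".toList) <:+: cs := hNB _ (by simp [pvBad])
  have nU3 : ¬ (pvUBE ++ "Discord".toList) <:+: cs := hNB _ (by simp [pvBad])
  have nG0 : ¬ (pvGM ++ "GitHub".toList) <:+: cs := hNB _ (by simp [pvBad])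
  have nG1 : ¬ (pvGM ++ "GitLab".toList) <:+: cs := hNB _ (by simp [pvBad])
  have nG2 : ¬ (pvGM ++ "Slack".toList) <:+: cs := hNB _ (by simp [pvBad])
  have nG3 : ¬ (pvGM ++ "Discord".toList) <:+: cs := hNB _ (by simp [pvBad])
  have nG4 : ¬ (pvGM ++ "UberEats".toList) <:+: cs := hNB _ (by simp [pvBad])
  have nG5 : ¬ (pvGM ++ "DoorDash".toList) <:+: cs := hNB _ (by simp [pvBad])
  -- intermediate strings
  set L1 := pvScan ["GitHub".toList] cs with hL1
  set L2 := pvScan ["GitLab".toList] L1 with hL2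
  set L3 := pvScan ["Slack".toList] L2 with hL3
  set L4 := pvScan ["Discord".toList] L3 with hL4
  set L5 := pvScan ["UberEats".toList] L4 with hL5
  -- push the needed pattern facts to their levels
  have nU1L : ¬ (pvUBE ++ "GitLab".toList) <:+: L1 :=
    pvPushSimple _ _ (by decide) cs nU1
  have nU2L : ¬ (pvUBE ++ "Slack".toList) <:+: L2 :=
    pvPushSimple _ _ (by decide) L1 (pvPushSimple _ _ (by decide) cs nU2)
  have nU3L : ¬ (pvUBE ++ "Discord".toList) <:+: L3 :=
    pvPushSimple _ _ (by decide) L2 (pvPushSimple _ _ (by decide) L1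
      (pvPushSimple _ _ (by decide) cs nU3))
  have nG1L : ¬ (pvGM ++ "GitLab".toList) <:+: L1 :=
    pvPushSimple _ _ (by decide) cs nG1
  have nG2L : ¬ (pvGM ++ "Slack".toList) <:+: L2 :=
    pvPushSimple _ _ (by decide) L1 (pvPushSimple _ _ (by decide) cs nG2)
  have nG3L : ¬ (pvGM ++ "Discord".toList) <:+: L3 :=
    pvPushSimple _ _ (by decide) L2 (pvPushSimple _ _ (by decide) L1
      (pvPushSimple _ _ (by decide) cs nG3))
  have nG4L1 : ¬ (pvGM ++ "UberEats".toList) <:+: L1 :=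
    pvPushGMS _ (by decide) cs nG4 nU0
  have nG4L2 : ¬ (pvGM ++ "UberEats".toList) <:+: L2 :=
    pvPushGMS _ (by decide) L1 nG4L1 nU1L
  have nG4L3 : ¬ (pvGM ++ "UberEats".toList) <:+: L3 :=
    pvPushGMS _ (by decide) L2 nG4L2 nU2L
  have nG4L4 : ¬ (pvGM ++ "UberEats".toList) <:+: L4 :=
    pvPushGMS _ (by decide) L3 nG4L3 nU3L
  have nG5L : ¬ (pvGM ++ "DoorDash".toList) <:+: L5 :=
    pvPushSimple _ _ (by decide) L4
      (pvPushSimple _ _ (by decide) L3 (pvPushSimple _ _ (by decide) L2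
        (pvPushSimple _ _ (by decide) L1 (pvPushSimple _ _ (by decide) cs nG5))))
  -- fuse from the outside in
  have f8 : ∀ y : List Char, pvScan ["Exa".toList] (pvScan ["Brave".toList] y)
      = pvScan ["Brave".toList, "Exa".toList] y := by
    intro y
    refine pvFusion _ _ (by decide) (by decide) (by decide) (by decide) (by decide) (by decide)
      y.length y le_rfl ?_
    intro t'' hm
    fin_cases hm
    exact pvCF1_noS _ _ _ (by decide)
  have f7 : ∀ y : List Char, pvScan ["Brave".toList, "Exa".toList]
      (pvScan ["Mapbox".toList] y)
      = pvScan ["Mapbox".toList, "Brave".toList, "Exa".toList] y := by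
    intro y
    refine pvFusion _ _ (by decide) (by decide) (by decide) (by decide) (by decide) (by decide)
      y.length y le_rfl ?_
    intro t'' hm
    fin_cases hm <;> exact pvCF1_noS _ _ _ (by decide)
  have f6 : ∀ y : List Char, pvScan ["Mapbox".toList, "Brave".toList, "Exa".toList]
      (pvScan ["Google Maps".toList] y)
      = pvScan ["Google Maps".toList, "Mapbox".toList, "Brave".toList, "Exa".toList] y := by
    intro y
    refine pvFusion _ _ (by decide) (by decide) (by decide) (by decide) (by decide) (by decide)
      y.length y le_rfl ?_
    intro t'' hm
    fin_cases hm <;> exact pvCF1_noS _ _ _ (by decide)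
  have f5 : pvScan ["Google Maps".toList, "Mapbox".toList, "Brave".toList, "Exa".toList]
      (pvScan ["DoorDash".toList] L5)
      = pvScan ["DoorDash".toList, "Google Maps".toList, "Mapbox".toList, "Brave".toList,
          "Exa".toList] L5 := by
    refine pvFusion _ _ (by decide) (by decide) (by decide) (by decide) (by decide) (by decide)
      L5.length L5 le_rfl ?_
    intro t'' hm
    fin_cases hm
    · exact pvCF1_sTok _ _ _ pvGM (by decide) (by decide) nG5L
    · exact pvCF1_noS _ _ _ (by decide)
    · exact pvCF1_noS _ _ _ (by decide)
    · exact pvCF1_noS _ _ _ (by decide)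
  have f4 : pvScan ["DoorDash".toList, "Google Maps".toList, "Mapbox".toList, "Brave".toList,
        "Exa".toList] (pvScan ["UberEats".toList] L4)
      = pvScan ["UberEats".toList, "DoorDash".toList, "Google Maps".toList, "Mapbox".toList,
          "Brave".toList, "Exa".toList] L4 := by
    refine pvFusion _ _ (by decide) (by decide) (by decide) (by decide) (by decide) (by decide)
      L4.length L4 le_rfl ?_
    intro t'' hm
    fin_cases hm
    · exact pvCF1_noS _ _ _ (by decide)
    · exact pvCF1_sTok _ _ _ pvGM (by decide) (by decide) nG4L4
    · exact pvCF1_noS _ _ _ (by decide)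
    · exact pvCF1_noS _ _ _ (by decide)
    · exact pvCF1_noS _ _ _ (by decide)
  have f3 : pvScan ["UberEats".toList, "DoorDash".toList, "Google Maps".toList, "Mapbox".toList,
        "Brave".toList, "Exa".toList] (pvScan ["Discord".toList] L3)
      = pvScan ["Discord".toList, "UberEats".toList, "DoorDash".toList, "Google Maps".toList,
          "Mapbox".toList, "Brave".toList, "Exa".toList] L3 := by
    refine pvFusion _ _ (by decide) (by decide) (by decide) (by decide) (by decide) (by decide)
      L3.length L3 le_rfl ?_
    intro t'' hm
    fin_cases hm
    · exact pvCF1_sTok _ _ _ pvUBE (by decide) (by decide) nU3L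
    · exact pvCF1_noS _ _ _ (by decide)
    · exact pvCF1_sTok _ _ _ pvGM (by decide) (by decide) nG3L
    · exact pvCF1_noS _ _ _ (by decide)
    · exact pvCF1_noS _ _ _ (by decide)
    · exact pvCF1_noS _ _ _ (by decide)
  have f2 : pvScan ["Discord".toList, "UberEats".toList, "DoorDash".toList,
        "Google Maps".toList, "Mapbox".toList, "Brave".toList, "Exa".toList]
        (pvScan ["Slack".toList] L2)
      = pvScan ["Slack".toList, "Discord".toList, "UberEats".toList, "DoorDash".toList,
          "Google Maps".toList, "Mapbox".toList, "Brave".toList, "Exa".toList] L2 := by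
    refine pvFusion _ _ (by decide) (by decide) (by decide) (by decide) (by decide) (by decide)
      L2.length L2 le_rfl ?_
    intro t'' hm
    fin_cases hm
    · exact pvCF1_noS _ _ _ (by decide)
    · exact pvCF1_sTok _ _ _ pvUBE (by decide) (by decide) nU2L
    · exact pvCF1_noS _ _ _ (by decide)
    · exact pvCF1_sTok _ _ _ pvGM (by decide) (by decide) nG2L
    · exact pvCF1_noS _ _ _ (by decide)
    · exact pvCF1_noS _ _ _ (by decide)
    · exact pvCF1_noS _ _ _ (by decide)
  have f1 : pvScan ["Slack".toList, "Discord".toList, "UberEats".toList, "DoorDash".toList,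
        "Google Maps".toList, "Mapbox".toList, "Brave".toList, "Exa".toList]
        (pvScan ["GitLab".toList] L1)
      = pvScan ["GitLab".toList, "Slack".toList, "Discord".toList, "UberEats".toList,
          "DoorDash".toList, "Google Maps".toList, "Mapbox".toList, "Brave".toList,
          "Exa".toList] L1 := by
    refine pvFusion _ _ (by decide) (by decide) (by decide) (by decide) (by decide) (by decide)
      L1.length L1 le_rfl ?_
    intro t'' hm
    fin_cases hm
    · exact pvCF1_noS _ _ _ (by decide)
    · exact pvCF1_noS _ _ _ (by decide)
    · exact pvCF1_sTok _ _ _ pvUBE (by decide) (by decide) nU1L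
    · exact pvCF1_noS _ _ _ (by decide)
    · exact pvCF1_sTok _ _ _ pvGM (by decide) (by decide) nG1L
    · exact pvCF1_noS _ _ _ (by decide)
    · exact pvCF1_noS _ _ _ (by decide)
    · exact pvCF1_noS _ _ _ (by decide)
  have f0 : pvScan ["GitLab".toList, "Slack".toList, "Discord".toList, "UberEats".toList,
        "DoorDash".toList, "Google Maps".toList, "Mapbox".toList, "Brave".toList,
        "Exa".toList] (pvScan ["GitHub".toList] cs)
      = pvScan pvToks cs := by
    have : pvToks = "GitHub".toList :: ["GitLab".toList, "Slack".toList, "Discord".toList,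
        "UberEats".toList, "DoorDash".toList, "Google Maps".toList, "Mapbox".toList,
        "Brave".toList, "Exa".toList] := rfl
    rw [this]
    refine pvFusion _ _ (by decide) (by decide) (by decide) (by decide) (by decide) (by decide)
      cs.length cs le_rfl ?_
    intro t'' hm
    fin_cases hm
    · exact pvCF1_noS _ _ _ (by decide)
    · exact pvCF1_noS _ _ _ (by decide)
    · exact pvCF1_noS _ _ _ (by decide)
    · exact pvCF1_sTok _ _ _ pvUBE (by decide) (by decide) nU0
    · exact pvCF1_noS _ _ _ (by decide)
    · exact pvCF1_sTok _ _ _ pvGM (by decide) (by decide) nG0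
    · exact pvCF1_noS _ _ _ (by decide)
    · exact pvCF1_noS _ _ _ (by decide)
    · exact pvCF1_noS _ _ _ (by decide)
  rw [f8, f7, f6]
  rw [show pvScan ["DoorDash".toList] (pvScan ["UberEats".toList] (pvScan ["Discord".toList]
      (pvScan ["Slack".toList] (pvScan ["GitLab".toList] (pvScan ["GitHub".toList] cs)))))
      = pvScan ["DoorDash".toList] L5 from rfl]
  rw [f5, f4, f3, f2, f1, f0]

-- ===== VERDICT (by name: the statement is the Claim_ definition above) =====
theorem sanitize_tool_doc_py_spec : Claim_equal_sanitize_tool_doc_py := by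
  intro doc hdom hpre
  unfold Spec_sanitize_tool_doc_py
  unfold Pre_sanitize_tool_doc_py at hpre
  have hNB : ∀ p ∈ pvBad, ¬ p <:+: doc.toList := by
    intro p hp hinf
    exact absurd (hpre ▸ (pvBadHit_iff doc.toList).mpr ⟨p, hp, hinf⟩) Bool.false_ne_true
  unfold sanitize_tool_doc_py sanitize_tool_doc_py_alt
  simp only [List.foldl_cons, List.foldl_nil]
  apply congrArg
  apply congrArg
  -- the two cleaned strings are equal
  have hcore : (PySem.Str.replace (PySem.Str.replace (PySem.Str.replace (PySem.Str.replace
      (PySem.Str.replace (PySem.Str.replace (PySem.Str.replace (PySem.Str.replace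
      (PySem.Str.replace (PySem.Str.replace doc "GitHub" "service") "GitLab" "service")
      "Slack" "service") "Discord" "service") "UberEats" "service") "DoorDash" "service")
      "Google Maps" "service") "Mapbox" "service") "Brave" "service") "Exa" "service").toList
      = pvScan pvToks doc.toList := by
    simp only [PySem.Str.toList_replace]
    rw [show "service".toList = pvSvc from rfl]
    rw [pvReplace_eq_scan "GitHub".toList (by decide),
        pvReplace_eq_scan "GitLab".toList (by decide),
        pvReplace_eq_scan "Slack".toList (by decide),
        pvReplace_eq_scan "Discord".toList (by decide),
        pvReplace_eq_scan "UberEats".toList (by decide),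
        pvReplace_eq_scan "DoorDash".toList (by decide),
        pvReplace_eq_scan "Google Maps".toList (by decide),
        pvReplace_eq_scan "Mapbox".toList (by decide),
        pvReplace_eq_scan "Brave".toList (by decide),
        pvReplace_eq_scan "Exa".toList (by decide)]
    exact pvChain doc.toList hNB
  rw [← hcore, String.ofList_toList]
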